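-- pv_equiv track=rewrite | github.com/Donatello-eng/WatchScore | watchscore-server/app/main.py | _order_sections
-- ===== SOURCE A (Python) =====
-- from typing import List, Optional, Dict, Any, TypedDict
--
-- SECTIONS = [
--     "quick_facts", "overall", "brand_reputation", "movement_quality",
--     "materials_build", "maintenance_risks", "value_for_money", "alternatives"
-- ]
--
-- def _order_sections(sections_param: Optional[str]) -> List[str]:
--     ALL = SECTIONS[:]  # preserve canonical order
--     if not sections_param:
--         return ALL
--     wanted = [s.strip() for s in sections_param.split(",") if s.strip() in ALL]
--     dedup = []
--     seen = set()
--     for s in wanted: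
--         if s not in seen:
--             dedup.append(s); seen.add(s)
--     ordered = [s for s in ALL if s in seen]
--     if "quick_facts" in ordered:
--         ordered.remove("quick_facts")
--         ordered.insert(0, "quick_facts")
--     return ordered
-- ===== SOURCE B (Python) =====
-- from typing import List, Optional
--
-- SECTIONS = [
--     "quick_facts", "overall", "brand_reputation", "movement_quality",
--     "materials_build", "maintenance_risks", "value_for_money", "alternatives"
-- ]
--
-- def _order_sections(sections_param: Optional[str]) -> List[str]:
--     if not sections_param:
--         return SECTIONS[:]
--     pos = {name: i for i, name in enumerate(SECTIONS)}
--     tokens = [s.strip() for s in sections_param.split(",")]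
--     return sorted({t for t in tokens if t in pos}, key=pos.__getitem__)
-- ===== Notes on version B (the rewrite author's own statement) =====
-- stated objective: idiomatic
-- what changed: B replaces A's dedup-loop plus scan-of-SECTIONS-with-membership-test (and the quick_facts remove/insert fixup) by building a name-to-index map once and sorting the set of recognised tokens by canonical index; quick_facts-first falls out of index 0.
import Mathlib
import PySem

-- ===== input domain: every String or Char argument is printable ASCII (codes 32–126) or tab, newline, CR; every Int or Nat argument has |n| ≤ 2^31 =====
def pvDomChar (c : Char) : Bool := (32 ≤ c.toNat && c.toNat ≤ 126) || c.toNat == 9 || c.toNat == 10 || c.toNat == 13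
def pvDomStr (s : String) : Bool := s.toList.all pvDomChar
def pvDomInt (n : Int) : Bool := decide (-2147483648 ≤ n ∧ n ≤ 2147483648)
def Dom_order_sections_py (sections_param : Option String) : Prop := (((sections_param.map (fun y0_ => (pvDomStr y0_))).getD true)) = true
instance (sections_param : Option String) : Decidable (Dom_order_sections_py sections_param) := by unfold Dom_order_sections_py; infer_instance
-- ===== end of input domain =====

-- B replaces A's scan-SECTIONS-and-test-membership pipeline by an index map and a key-sort of the
-- present tokens (objective: idiomatic; same result, proved equal on all inputs).

-- ===== PORT A =====
def SECTIONS_L : List String :=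
  ["quick_facts", "overall", "brand_reputation", "movement_quality",
   "materials_build", "maintenance_risks", "value_for_money", "alternatives"]

def order_sections_py (sections_param : Option String) : List String :=
  let ALL := SECTIONS_L
  match sections_param with
  | none => ALL
  | some sp =>
    if sp = "" then ALL
    else
      let wanted := ((((PySem.Str.split? sp ",").getD [])).filter
          (fun s => decide (PySem.Str.strip s ∈ ALL))).map PySem.Str.strip
      let st := wanted.foldl (fun (p : List String × PySem.Set String) s =>
          if PySem.Set.contains p.2 s = false then (p.1 ++ [s], PySem.Set.add p.2 s) else p)
        ([], PySem.Set.empty)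
      let ordered := ALL.filter (fun s => PySem.Set.contains st.2 s)
      if "quick_facts" ∈ ordered then
        PySem.List.insert ((PySem.List.remove? ordered "quick_facts").getD ordered) 0 "quick_facts"
      else ordered

-- ===== PORT B =====
def order_sections_py_alt (sections_param : Option String) : List String :=
  match sections_param with
  | none => SECTIONS_L
  | some sp =>
    if sp = "" then SECTIONS_L
    else
      let pos : PySem.Dict String Int :=
        (PySem.List.enumerate SECTIONS_L 0).foldl (fun d p => d.insert p.2 p.1) PySem.Dict.empty
      let tokens := (((PySem.Str.split? sp ",").getD [])).map PySem.Str.strip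
      PySem.List.sorted (PySem.Set.ofList (tokens.filter (fun t => pos.contains t)))
        (fun t => pos.getD t 0) false

-- ===== PRECONDITION & SPEC =====
def Spec_order_sections_py (sections_param : Option String) (out : List String) : Prop := out = order_sections_py_alt sections_param
instance (sections_param : Option String) (out : List String) : Decidable (Spec_order_sections_py sections_param out) := by unfold Spec_order_sections_py; infer_instance

-- ===== CLAIM (what is proved, stated in full; the proofs are below) =====
def Claim_equal_order_sections_py : Prop := ∀ (sections_param : Option String), Dom_order_sections_py sections_param → Spec_order_sections_py sections_param (order_sections_py sections_param)

-- ===== LEMMAS AND PROOFS =====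

def pvPos : PySem.Dict String Int :=
  (PySem.List.enumerate SECTIONS_L 0).foldl (fun d p => d.insert p.2 p.1) PySem.Dict.empty

lemma pvPos_contains (x : String) : pvPos.contains x = true ↔ x ∈ SECTIONS_L := by
  rw [PySem.Dict.contains_iff_mem_keys]
  have h : pvPos.keys = SECTIONS_L := by decide
  rw [h]

-- the guarded dedup loop's `seen` component is just set(wanted)
lemma seen_fold (l : List String) (p : List String × PySem.Set String) :
    (l.foldl (fun (p : List String × PySem.Set String) s =>
        if PySem.Set.contains p.2 s = false then (p.1 ++ [s], PySem.Set.add p.2 s) else p) p).2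
      = PySem.Set.update p.2 l := by
  induction l generalizing p with
  | nil => rfl
  | cons x xs ih =>
      simp only [List.foldl_cons]
      by_cases h : PySem.Set.contains p.2 x = false
      · rw [if_pos h, ih]; rfl
      · rw [if_neg h, ih]
        have hc : PySem.Set.contains p.2 x = true := by
          revert h; cases PySem.Set.contains p.2 x <;> simp
        have hm : x ∈ p.2 := by simpa using hc
        have hadd : PySem.Set.add p.2 x = p.2 := by simp [PySem.Set.add, hm]
        show List.foldl PySem.Set.add p.2 xs = List.foldl PySem.Set.add (PySem.Set.add p.2 x) xs
        rw [hadd]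

-- A's result, given any `wanted` list whose members are the tokens lying in SECTIONS,
-- is SECTIONS filtered by token membership
lemma a_char (w toks : List String)
    (hw : ∀ x : String, x ∈ w ↔ x ∈ toks ∧ x ∈ SECTIONS_L) :
    (let st := w.foldl (fun (p : List String × PySem.Set String) s =>
          if PySem.Set.contains p.2 s = false then (p.1 ++ [s], PySem.Set.add p.2 s) else p)
        ([], PySem.Set.empty)
     let ordered := SECTIONS_L.filter (fun s => PySem.Set.contains st.2 s)
     if "quick_facts" ∈ ordered then
        PySem.List.insert ((PySem.List.remove? ordered "quick_facts").getD ordered) 0 "quick_facts"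
     else ordered)
    = SECTIONS_L.filter (fun s => decide (s ∈ toks)) := by
  simp only [seen_fold]
  have hset : PySem.Set.update PySem.Set.empty w = PySem.Set.ofList w := rfl
  rw [hset]
  have hfc : SECTIONS_L.filter (fun s => PySem.Set.contains (PySem.Set.ofList w) s)
      = SECTIONS_L.filter (fun s => decide (s ∈ toks)) := by
    apply List.filter_congr
    intro x hx
    have h1 : PySem.Set.contains (PySem.Set.ofList w) x = true ↔ x ∈ toks := by
      simp only [PySem.Set.contains, List.contains_iff_mem, PySem.Set.mem_ofList, hw]
      exact ⟨fun h => h.1, fun h => ⟨h, hx⟩⟩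
    by_cases ht : x ∈ toks
    · rw [h1.mpr ht]; exact (decide_eq_true ht).symm
    · simp only [ht, decide_false]
      cases hcc : PySem.Set.contains (PySem.Set.ofList w) x
      · rfl
      · exact absurd (h1.mp hcc) ht
  rw [hfc]
  -- the quick_facts remove/insert step is a no-op: quick_facts heads SECTIONS
  by_cases hq : ("quick_facts" : String) ∈ toks
  · have : SECTIONS_L.filter (fun s => decide (s ∈ toks))
        = "quick_facts" :: (SECTIONS_L.tail.filter (fun s => decide (s ∈ toks))) := by
      show List.filter _ ("quick_facts" :: SECTIONS_L.tail) = _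
      rw [List.filter_cons_of_pos (by simpa using hq)]
    rw [this]
    rw [if_pos (List.mem_cons_self)]
    rw [PySem.List.remove?_cons_self]
    simp [PySem.List.insert_zero]
  · have : SECTIONS_L.filter (fun s => decide (s ∈ toks))
        = SECTIONS_L.tail.filter (fun s => decide (s ∈ toks)) := by
      show List.filter _ ("quick_facts" :: SECTIONS_L.tail) = _
      rw [List.filter_cons_of_neg (by simpa using hq)]
    rw [this]
    rw [if_neg]
    intro hmem
    have := (List.mem_filter.mp hmem).1
    revert this; decide

-- B's result, for given tokens, is the same filter
lemma b_char (toks : List String) :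
    PySem.List.sorted (PySem.Set.ofList (toks.filter (fun t => pvPos.contains t)))
        (fun t => pvPos.getD t 0) false
      = SECTIONS_L.filter (fun s => decide (s ∈ toks)) := by
  apply PySem.List.sorted_eq_of_perm_of_pairwise_lt
  · rw [List.perm_ext_iff_of_nodup
      ((by decide : SECTIONS_L.Nodup).filter _) (PySem.Set.nodup_ofList _)]
    intro a
    simp only [List.mem_filter, PySem.Set.mem_ofList, pvPos_contains, decide_eq_true_eq]
    tauto
  · exact List.Pairwise.sublist List.filter_sublist
      (by decide : SECTIONS_L.Pairwise (fun a b => pvPos.getD a 0 < pvPos.getD b 0))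

-- ===== VERDICT (by name: the statement is the Claim_ definition above) =====
theorem order_sections_py_spec : Claim_equal_order_sections_py := by
  intro sp _
  unfold Spec_order_sections_py order_sections_py order_sections_py_alt
  match sp with
  | none => rfl
  | some s =>
      by_cases h : s = ""
      · subst h; rfl
      · simp only [h, if_false]
        have hw : ∀ x : String,
            x ∈ (((PySem.Str.split? s ",").getD []).filter
                (fun t => decide (PySem.Str.strip t ∈ SECTIONS_L))).map PySem.Str.strip
              ↔ x ∈ ((PySem.Str.split? s ",").getD []).map PySem.Str.strip ∧ x ∈ SECTIONS_L := by
          intro x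
          simp only [List.mem_map, List.mem_filter, decide_eq_true_eq]
          constructor
          · rintro ⟨t, ⟨ht, hs⟩, rfl⟩; exact ⟨⟨t, ht, rfl⟩, hs⟩
          · rintro ⟨⟨t, ht, rfl⟩, hs⟩; exact ⟨t, ⟨ht, hs⟩, rfl⟩
        have ha := a_char _ _ hw
        simp only at ha
        rw [ha, ← b_char]
        rfl
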